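-- pv_equiv track=rewrite | github.com/VJ-P/Daily-Leetcode | January-2020/minimumEffort.py | minimumEffort
-- ===== SOURCE A (Python) =====
-- from typing import List
--
-- def minimumEffort(tasks: List[List[int]]) -> int:
--     tasks.sort(key=lambda x: x[0] - x[1])
--     minE = 0
--     curr = 0
--
--     for task in tasks:
--         if curr < task[1]:
--             minE += task[1] - curr
--             curr = task[1]
--
--         curr -= task[0]
--
--     return minE
-- ===== SOURCE B (Python) =====
-- from typing import List
--
-- def minimumEffort(tasks: List[List[int]]) -> int:
--     tasks.sort(key=lambda x: x[0] - x[1])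
--     prefix = [0]
--     for t in tasks:
--         prefix.append(prefix[-1] + t[0])
--     return max([0] + [t[1] + p for p, t in zip(prefix, tasks)])
-- ===== Notes on version B (the rewrite author's own statement) =====
-- stated objective: alternative
-- what changed: After the same in-place sort by x[0]-x[1], B replaces A's single-pass deficit-patching accumulator (curr/minE) by two staged passes: it first builds the list of prefix sums of task costs, then returns the maximum of 0 and task[1]+prefix over the zipped lists.
import Mathlib
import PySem

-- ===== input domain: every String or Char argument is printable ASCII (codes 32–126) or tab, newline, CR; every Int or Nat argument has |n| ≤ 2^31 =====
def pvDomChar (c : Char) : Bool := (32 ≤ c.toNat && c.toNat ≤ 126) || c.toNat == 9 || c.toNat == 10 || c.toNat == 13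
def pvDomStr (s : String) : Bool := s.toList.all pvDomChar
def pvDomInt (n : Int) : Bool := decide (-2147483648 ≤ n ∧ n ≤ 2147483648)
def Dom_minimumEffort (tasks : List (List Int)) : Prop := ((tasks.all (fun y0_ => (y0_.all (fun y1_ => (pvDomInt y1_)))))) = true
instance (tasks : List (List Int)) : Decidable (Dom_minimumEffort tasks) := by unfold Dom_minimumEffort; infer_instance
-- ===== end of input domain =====

-- B replaces A's one-pass deficit-patching accumulator by two staged passes (a prefix-sum list of
-- costs, then a max over the zipped lists); both sort the argument in place (return-value
-- equivalence proved; B performs the same in-place sort mutation as A).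

-- ===== PORT A =====
-- sort key:  lambda x: x[0] - x[1]   (x[0]/x[1] raise on short lists; such inputs are outside Pre_)
def pvKey (x : List Int) : Int := ((PySem.List.pyGet? x 0).getD 0) - ((PySem.List.pyGet? x 1).getD 0)

-- loop body of A: state (minE, curr)
def pvStepA (s : Int × Int) (task : List Int) : Int × Int :=
  let t1 := (PySem.List.pyGet? task 1).getD 0
  let t0 := (PySem.List.pyGet? task 0).getD 0
  let s' := if s.2 < t1 then (s.1 + (t1 - s.2), t1) else s
  (s'.1, s'.2 - t0)

def minimumEffort (tasks : List (List Int)) : Int :=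
  ((PySem.List.sorted tasks pvKey false).foldl pvStepA (0, 0)).1

-- ===== PORT B =====
-- first pass of B: 'for t in tasks: prefix.append(prefix[-1] + t[0])' starting from a given prefix list
def pvBuild (ps : List Int) (l : List (List Int)) : List Int :=
  l.foldl (fun ps t => ps ++ [((PySem.List.pyGet? ps (-1)).getD 0) + ((PySem.List.pyGet? t 0).getD 0)]) ps

def minimumEffort_alt (tasks : List (List Int)) : Int :=
  let s := PySem.List.sorted tasks pvKey false
  let pre := pvBuild [0] s
  ((pre.zip s).map (fun pt => ((PySem.List.pyGet? pt.2 1).getD 0) + pt.1)).foldl max 0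

-- ===== PRECONDITION & SPEC =====
-- Pre_ excludes exactly the inputs on which Python A raises IndexError (an inner list with fewer
-- than two elements, indexed by the sort key and the loop body).
def Pre_minimumEffort (tasks : List (List Int)) : Prop := (tasks.all (fun t => 2 ≤ t.length)) = true
instance (tasks : List (List Int)) : Decidable (Pre_minimumEffort tasks) := by unfold Pre_minimumEffort; infer_instance
def pvWitness_minimumEffort : List (List Int) := [[1, 2], [3, 4]]

def Spec_minimumEffort (tasks : List (List Int)) (out : Int) : Prop := out = minimumEffort_alt tasks
instance (tasks : List (List Int)) (out : Int) : Decidable (Spec_minimumEffort tasks out) := by unfold Spec_minimumEffort; infer_instance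

-- ===== CLAIM (what is proved, stated in full; the proofs are below) =====
def Claim_equal_minimumEffort : Prop := ∀ (tasks : List (List Int)), Dom_minimumEffort tasks → Pre_minimumEffort tasks → Spec_minimumEffort tasks (minimumEffort tasks)

-- ===== LEMMAS AND PROOFS =====

-- proof-side intermediate loop: state (ans, pre); bridges A's fold to B's staged passes
def pvStepM (s : Int × Int) (task : List Int) : Int × Int :=
  (max s.1 (((PySem.List.pyGet? task 1).getD 0) + s.2), s.2 + ((PySem.List.pyGet? task 0).getD 0))

-- Invariant: A's curr equals its minE minus the prefix sum p of the costs consumed so far,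
-- and then A's minE and the intermediate ans evolve identically.
theorem pv_fold_eq (l : List (List Int)) : ∀ (m p : Int),
    (l.foldl pvStepA (m, m - p)).1 = (l.foldl pvStepM (m, p)).1 := by
  induction l with
  | nil => intro m p; rfl
  | cons t l ih =>
    intro m p
    simp only [List.foldl_cons]
    set b := (PySem.List.pyGet? t 1).getD 0 with hb
    set a := (PySem.List.pyGet? t 0).getD 0 with ha
    have hA : pvStepA (m, m - p) t =
        ((max m (b + p)), (max m (b + p)) - (p + a)) := by
      simp only [pvStepA, ← hb, ← ha]
      by_cases h : m - p < b
      · simp only [if_pos h]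
        have : max m (b + p) = b + p := by omega
        simp [this]; constructor <;> omega
      · simp only [if_neg h]
        have : max m (b + p) = m := by omega
        simp [this]; omega
    have hB : pvStepM (m, p) t = (max m (b + p), p + a) := by
      simp [pvStepM, ← hb, ← ha]
    rw [hA, hB, ih]

-- the prefix-building fold only ever looks at the last element, so a prepended head passes through
theorem pvBuild_cons (l : List (List Int)) : ∀ (a : Int) (ps : List Int), ps ≠ [] →
    pvBuild (a :: ps) l = a :: pvBuild ps l := by
  induction l with
  | nil => intro a ps _; rfl
  | cons t l ih =>
    intro a ps hps
    obtain ⟨b, ps', rfl⟩ : ∃ b ps', ps = b :: ps' := by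
      cases ps with | nil => exact absurd rfl hps | cons b ps' => exact ⟨b, ps', rfl⟩
    simp only [pvBuild, List.foldl_cons] at *
    rw [show (a :: b :: ps') ++ [((PySem.List.pyGet? (a :: b :: ps') (-1)).getD 0) + ((PySem.List.pyGet? t 0).getD 0)]
        = a :: ((b :: ps') ++ [((PySem.List.pyGet? (b :: ps') (-1)).getD 0) + ((PySem.List.pyGet? t 0).getD 0)]) from by
      simp [PySem.List.pyGet?_neg_one, List.getLast?_cons_cons]]
    exact ih a _ (by simp)

-- the intermediate loop computes exactly B's staged max over zip(prefix, tasks)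
theorem pv_mid_eq_build (l : List (List Int)) : ∀ (m p : Int),
    (l.foldl pvStepM (m, p)).1
      = (((pvBuild [p] l).zip l).map (fun pt => ((PySem.List.pyGet? pt.2 1).getD 0) + pt.1)).foldl max m := by
  induction l with
  | nil => intro m p; rfl
  | cons t l ih =>
    intro m p
    set b := (PySem.List.pyGet? t 1).getD 0 with hb
    set a := (PySem.List.pyGet? t 0).getD 0 with ha
    have hbuild : pvBuild [p] (t :: l) = p :: pvBuild [p + a] l := by
      have : pvBuild [p] (t :: l) = pvBuild (p :: [p + a]) l := by
        simp [pvBuild, PySem.List.pyGet?_neg_one, ← ha]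
      rw [this, pvBuild_cons l p [p + a] (by simp)]
    rw [hbuild]
    simp only [List.foldl_cons, List.zip_cons_cons, List.map_cons, List.foldl_cons]
    have hstep : pvStepM (m, p) t = (max m (b + p), p + a) := by
      simp [pvStepM, ← hb, ← ha]
    rw [hstep, ih]

-- ===== VERDICT (by name: the statement is the Claim_ definition above) =====
theorem minimumEffort_spec : Claim_equal_minimumEffort := by
  intro tasks _ _
  unfold Spec_minimumEffort minimumEffort minimumEffort_alt
  have h1 := pv_fold_eq (PySem.List.sorted tasks pvKey false) 0 0
  have h2 := pv_mid_eq_build (PySem.List.sorted tasks pvKey false) 0 0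
  simp only [sub_zero] at h1
  rw [h1, h2]
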